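-- pv_equiv track=rewrite | github.com/M-Algorithm-Study/MunJiSu | W19/C_p_12938.py | solution
-- ===== SOURCE A (Python) =====
-- def solution(n, s):
--     # 집합의 원소의 개수 n과 모든 원소들의 합 s
--     # 원소 개수가 합보다 크면 집합은 존재할 수 없다
--     if n > s:
--         return [-1]
--
--     a, b = divmod(s, n)
--     answer = [a] * n
--
--     for i in range(b):
--         answer[i] += 1
--
--     return sorted(answer)
-- ===== SOURCE B (Python) =====
-- def solution(n, s):
--     if n > s:
--         return [-1]
--     out = []
--     r = s
--     for k in range(n, 0, -1):
--         q = r // k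
--         out.append(q)
--         r -= q
--     return out
-- ===== Notes on version B (the rewrite author's own statement) =====
-- stated objective: alternative
-- what changed: B replaces A's divmod + per-element increment loop + sort by a single greedy pass that, with k elements left, emits r // k of the remaining sum r, which produces the balanced multiset already in nondecreasing order.
import Mathlib
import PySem

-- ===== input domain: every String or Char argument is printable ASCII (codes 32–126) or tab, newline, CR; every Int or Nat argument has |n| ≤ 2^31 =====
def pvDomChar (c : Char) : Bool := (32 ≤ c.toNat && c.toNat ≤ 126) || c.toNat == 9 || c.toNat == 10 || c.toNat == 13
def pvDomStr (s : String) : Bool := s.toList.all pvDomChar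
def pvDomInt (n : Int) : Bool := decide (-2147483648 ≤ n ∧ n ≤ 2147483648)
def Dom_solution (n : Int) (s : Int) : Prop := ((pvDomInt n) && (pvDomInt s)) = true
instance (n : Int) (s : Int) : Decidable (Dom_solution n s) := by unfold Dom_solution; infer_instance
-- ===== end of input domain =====

-- B abandons divmod entirely: a single greedy pass that, with k elements still to emit,
-- emits r // k of the remaining sum r — no list mutation, no sort (objective: alternative).

-- ===== PORT A =====
-- [a] * n  →  List.replicate n.toNat a  (Python's list*n is [] for n ≤ 0, exactly toNat's clamp);
-- answer[i] += 1 is ported with getD/set, exact here since the loop only reaches 0 ≤ i < len(answer).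
def solution (n : Int) (s : Int) : List Int :=
  if n > s then [-1]
  else
    let a := PySem.Int.floordiv s n
    let b := PySem.Int.mod s n
    let answer := List.replicate n.toNat a
    let answer := (PySem.List.pyRange 0 b 1).foldl
      (fun acc i => acc.set i.toNat (acc.getD i.toNat 0 + 1)) answer
    PySem.List.sorted answer (fun x => x) false

-- ===== PORT B =====
def solution_alt (n : Int) (s : Int) : List Int :=
  if n > s then [-1]
  else
    ((PySem.List.pyRange n 0 (-1)).foldl
      (fun (st : List Int × Int) k =>
        let q := PySem.Int.floordiv st.2 k
        (st.1 ++ [q], st.2 - q))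
      ([], s)).1

-- ===== PRECONDITION & SPEC =====
-- A raises ZeroDivisionError exactly when n = 0 and 0 ≤ s (divmod(s, 0)); those inputs are excluded.
def Pre_solution (n : Int) (s : Int) : Prop := ¬ (n = 0 ∧ 0 ≤ s)
instance (n : Int) (s : Int) : Decidable (Pre_solution n s) := by unfold Pre_solution; infer_instance
def pvWitness_solution : Int × Int := (3, 7)
def Spec_solution (n : Int) (s : Int) (out : List Int) : Prop := out = solution_alt n s
instance (n : Int) (s : Int) (out : List Int) : Decidable (Spec_solution n s out) := by unfold Spec_solution; infer_instance

-- ===== CLAIM (what is proved, stated in full; the proofs are below) =====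
def Claim_equal_solution : Prop := ∀ (n : Int) (s : Int), Dom_solution n s → Pre_solution n s → Spec_solution n s (solution n s)

-- ===== LEMMAS AND PROOFS =====

-- The increment loop of A turns [a]*m into [a+1]*k ++ [a]*(m-k) after k steps (k ≤ m).
theorem pv_loop (a : Int) (m : Nat) : ∀ k : Nat, k ≤ m →
    (PySem.List.pyRange 0 (k : Int) 1).foldl
      (fun acc i => acc.set i.toNat (acc.getD i.toNat 0 + 1)) (List.replicate m a)
    = List.replicate k (a + 1) ++ List.replicate (m - k) a := by
  intro k
  induction k with
  | zero => intro _; simp [show PySem.List.pyRange 0 (0 : Int) 1 = [] from rfl]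
  | succ k ih =>
    intro hkm
    have h1 : ((k : Int) + 1) = ((k + 1 : Nat) : Int) := by push_cast; ring
    rw [← h1, PySem.List.pyRange_one_succ_right (by positivity), List.foldl_append,
      ih (Nat.le_of_succ_le hkm)]
    have hk : k < m := hkm
    have hrep : List.replicate (m - k) a = a :: List.replicate (m - k - 1) a := by
      rw [← List.replicate_succ]; congr 1; omega
    simp only [List.foldl_cons, List.foldl_nil, Int.toNat_natCast, hrep]
    rw [List.set_append_right _ _ (by simp),
      show List.replicate (m - (k + 1)) a = List.replicate (m - k - 1) a from by congr 1]
    simp [List.replicate_succ' (n := k)]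

-- sorted([a+1]*k ++ [a]*r) = [a]*r ++ [a+1]*k
theorem pv_sorted (a : Int) (k r : Nat) :
    PySem.List.sorted (List.replicate k (a + 1) ++ List.replicate r a) (fun x => x) false
    = List.replicate r a ++ List.replicate k (a + 1) := by
  apply PySem.List.eq_of_perm_of_pairwise_le_of_injective (fun x : Int => x) (fun _ _ h => h)
  · exact (PySem.List.sorted_perm _ _ _).trans List.perm_append_comm
  · exact PySem.List.sorted_pairwise _ _
  · apply List.pairwise_append.mpr
    refine ⟨List.pairwise_replicate_of_refl, List.pairwise_replicate_of_refl, ?_⟩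
    intro x hx y hy
    rw [List.eq_of_mem_replicate hx, List.eq_of_mem_replicate hy]
    omega

-- B's greedy fold over [k, k-1, …, 1] starting from remaining sum a*k + c (0 ≤ c ≤ k)
-- emits k - c copies of a followed by c copies of a + 1.
theorem pv_greedy (a : Int) : ∀ (k c : Nat) (acc : List Int), c ≤ k →
    ((PySem.List.pyRange (k : Int) 0 (-1)).foldl
      (fun (st : List Int × Int) k =>
        let q := PySem.Int.floordiv st.2 k
        (st.1 ++ [q], st.2 - q))
      (acc, a * k + c)).1
    = acc ++ List.replicate (k - c) a ++ List.replicate c (a + 1) := by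
  intro k
  induction k with
  | zero =>
    intro c acc hck
    rw [PySem.List.pyRange_neg_one_eq_nil (by omega)]
    have : c = 0 := by omega
    simp [this]
  | succ k ih =>
    intro c acc hck
    have hK : (0 : Int) < ((k + 1 : Nat) : Int) := by positivity
    rw [PySem.List.pyRange_neg_one_cons (by omega), List.foldl_cons,
      show ((k + 1 : Nat) : Int) - 1 = ((k : Nat) : Int) from by push_cast; ring]
    have hdiv : PySem.Int.floordiv (a * ((k + 1 : Nat) : Int) + (c : Int)) ((k + 1 : Nat) : Int)
        = a + ((c : Int) / ((k + 1 : Nat) : Int)) := by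
      rw [PySem.Int.floordiv_eq_ediv_of_pos hK,
        show a * ((k + 1 : Nat) : Int) + (c : Int) = (c : Int) + a * ((k + 1 : Nat) : Int) from by ring,
        Int.add_mul_ediv_right _ _ (by omega)]
      ring
    by_cases hlt : c < k + 1
    · -- c < k+1: this step emits a
      have hc : ((c : Int) / ((k + 1 : Nat) : Int)) = 0 :=
        Int.ediv_eq_zero_of_lt (by positivity) (by exact_mod_cast hlt)
      have harg : a * ((k + 1 : Nat) : Int) + (c : Int) - (a + 0) = a * (k : Nat) + (c : Int) := by
        push_cast; ring
      simp only [hdiv, hc, harg]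
      rw [ih c (acc ++ [a + 0]) (by omega)]
      have : (k + 1) - c = (k - c) + 1 := by omega
      rw [this, List.replicate_succ]
      simp
    · -- c = k+1: this step emits a+1
      have hceq : c = k + 1 := by omega
      have hc : ((c : Int) / ((k + 1 : Nat) : Int)) = 1 := by
        rw [hceq]; exact Int.ediv_self (by omega)
      have harg : a * ((k + 1 : Nat) : Int) + (c : Int) - (a + 1) = a * (k : Nat) + (k : Nat) := by
        rw [hceq]; push_cast; ring
      simp only [hdiv, hc, harg]
      rw [show a * ((k : Nat) : Int) + ((k : Nat) : Int) = a * ((k : Nat) : Int) + ((k : Nat) : Int) from rfl,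
        ih k (acc ++ [a + 1]) le_rfl]
      rw [hceq]
      simp [List.replicate_succ]

-- ===== VERDICT (by name: the statement is the Claim_ definition above) =====
theorem solution_spec : Claim_equal_solution := by
  intro n s _ hpre
  unfold Spec_solution solution solution_alt
  by_cases hns : n > s
  · simp [hns]
  · simp only [hns, if_false]
    rw [not_lt] at hns
    set a := PySem.Int.floordiv s n with ha
    set b := PySem.Int.mod s n with hb
    rcases lt_trichotomy n 0 with hn | hn | hn
    · -- n < 0: A's list and loop are empty; B's countdown range is empty.
      have hbnd := PySem.Int.mod_neg_bounds s hn
      rw [PySem.List.pyRange_one_eq_nil (by omega), PySem.List.pyRange_neg_one_eq_nil (by omega)]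
      simp only [List.foldl_nil]
      rw [show n.toNat = 0 by omega]
      simp [PySem.List.sorted_eq_nil_iff]
    · exact absurd ⟨hn, by omega⟩ hpre
    · -- n > 0: 0 ≤ b < n and s = a*n + b
      have hb0 := PySem.Int.mod_nonneg s hn
      have hbn := PySem.Int.mod_lt s hn
      have hsum : a * n + b = s := by
        rw [ha, hb]; exact PySem.Int.floordiv_mul_add_mod s n
      obtain ⟨m, hm⟩ : ∃ m : Nat, n = (m : Int) := ⟨n.toNat, by omega⟩
      obtain ⟨c, hc⟩ : ∃ c : Nat, b = (c : Int) := ⟨b.toNat, by omega⟩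
      subst hm
      rw [← hsum, hc, pv_greedy a m c [] (by omega), pv_loop a (m : Int).toNat c (by omega)]
      simp only [Int.toNat_natCast, List.nil_append]
      rw [pv_sorted]
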